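-- pv_equiv track=rewrite | github.com/jendamikulik/pnp | DREAM6_v5.py | wiring_neighbors_circulant
-- ===== SOURCE A (Python) =====
-- def wiring_neighbors_circulant(C, d=6):
--     """Return neighbor sets for each clause index in a circulant d-regular graph.
--
--     Robustified: for small C or overlarge d we gracefully clip instead of raising.
--     """
--     if C <= 2 or d <= 0:
--         return [set() for _ in range(C)]
--     # even degree
--     if d % 2 != 0:
--         d -= 1
--     # cannot exceed C-1
--     d = min(d, C - 1)
--     if d <= 0:
--         return [set() for _ in range(C)]
--     nbrs = []
--     for i in range(C):
--         s = set()
--         for step in range(1, d//2 + 1):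
--             s.add((i - step) % C)
--             s.add((i + step) % C)
--         nbrs.append(s)
--     return nbrs
-- ===== SOURCE B (Python) =====
-- def wiring_neighbors_circulant(C, d=6):
--     """Neighbor sets built layer by layer: for each ring distance the two
--     rotated vertex sequences are materialized once and swept over the
--     preallocated table with zip, instead of each vertex computing its own
--     neighbors with per-element modular arithmetic in an inner loop."""
--     if C <= 2 or d <= 0:
--         return [set() for _ in range(C)]
--     h = min(d - d % 2, C - 1) // 2
--     nbrs = [set() for _ in range(C)]
--     for step in range(1, h + 1):
--         back = list(range(C - step, C)) + list(range(C - step))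
--         fwd = list(range(step, C)) + list(range(step))
--         for s, x in zip(nbrs, back):
--             s.add(x)
--         for s, y in zip(nbrs, fwd):
--             s.add(y)
--     return nbrs
-- ===== Notes on version B (the rewrite author's own statement) =====
-- stated objective: alternative
-- what changed: B interchanges the loops and removes per-element modular arithmetic: the clipping collapses into one half-degree computation, the table of C sets is preallocated, and for each ring distance the two rotated vertex sequences are materialized once as plain ranges and swept over the whole table with zip, instead of A's per-vertex inner loop computing (i±step)%C element by element.
import Mathlib
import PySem

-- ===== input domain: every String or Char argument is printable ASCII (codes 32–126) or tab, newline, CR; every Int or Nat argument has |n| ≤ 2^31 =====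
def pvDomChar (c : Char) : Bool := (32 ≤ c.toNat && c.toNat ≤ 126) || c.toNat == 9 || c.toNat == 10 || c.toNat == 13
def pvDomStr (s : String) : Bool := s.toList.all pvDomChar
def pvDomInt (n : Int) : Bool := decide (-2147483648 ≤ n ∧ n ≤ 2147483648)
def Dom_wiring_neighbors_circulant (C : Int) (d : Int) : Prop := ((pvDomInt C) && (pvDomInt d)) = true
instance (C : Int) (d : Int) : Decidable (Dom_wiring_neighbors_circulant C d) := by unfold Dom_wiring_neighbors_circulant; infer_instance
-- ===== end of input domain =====

-- B builds the graph layer by layer: per ring distance it materializes the two rotated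
-- vertex sequences once and sweeps them over the preallocated table with zip, instead of
-- A's per-vertex inner loop doing modular arithmetic for every element (alternative).

-- ===== PORT A =====
def wiring_neighbors_circulant (C : Int) (d : Int) : List (List Int) :=
  if C ≤ 2 ∨ d ≤ 0 then
    (PySem.List.pyRange 0 C).map (fun _ => ([] : List Int))
  else
    let d1 : Int := if PySem.Int.mod d 2 ≠ 0 then d - 1 else d
    let d2 : Int := min d1 (C - 1)
    if d2 ≤ 0 then
      (PySem.List.pyRange 0 C).map (fun _ => ([] : List Int))
    else
      (PySem.List.pyRange 0 C).foldl
        (fun nbrs i =>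
          let s : PySem.Set Int :=
            (PySem.List.pyRange 1 (PySem.Int.floordiv d2 2 + 1)).foldl
              (fun s step =>
                PySem.Set.add (PySem.Set.add s (PySem.Int.mod (i - step) C))
                  (PySem.Int.mod (i + step) C))
              PySem.Set.empty
          nbrs ++ [s]) []

-- ===== PORT B =====
-- one layer pass of Source B: back/fwd are the two rotated vertex sequences, each swept with zip
def pvLayerB (C : Int) (nbrs : List (List Int)) (step : Int) : List (List Int) :=
  let back : List Int := PySem.List.pyRange (C - step) C ++ PySem.List.pyRange 0 (C - step)
  let fwd : List Int := PySem.List.pyRange step C ++ PySem.List.pyRange 0 step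
  let nbrs1 := (nbrs.zip back).map (fun p => PySem.Set.add p.1 p.2)
  (nbrs1.zip fwd).map (fun p => PySem.Set.add p.1 p.2)

def wiring_neighbors_circulant_alt (C : Int) (d : Int) : List (List Int) :=
  if C ≤ 2 ∨ d ≤ 0 then
    (PySem.List.pyRange 0 C).map (fun _ => ([] : List Int))
  else
    let h : Int := PySem.Int.floordiv (min (d - PySem.Int.mod d 2) (C - 1)) 2
    (PySem.List.pyRange 1 (h + 1)).foldl (pvLayerB C)
      ((PySem.List.pyRange 0 C).map (fun _ => ([] : List Int)))

-- ===== PRECONDITION & SPEC =====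
def Spec_wiring_neighbors_circulant (C : Int) (d : Int) (out : List (List Int)) : Prop := out = wiring_neighbors_circulant_alt C d
instance (C : Int) (d : Int) (out : List (List Int)) : Decidable (Spec_wiring_neighbors_circulant C d out) := by unfold Spec_wiring_neighbors_circulant; infer_instance

-- ===== CLAIM (what is proved, stated in full; the proofs are below) =====
def Claim_equal_wiring_neighbors_circulant : Prop := ∀ (C : Int) (d : Int), Dom_wiring_neighbors_circulant C d → Spec_wiring_neighbors_circulant C d (wiring_neighbors_circulant C d)

-- ===== LEMMAS AND PROOFS =====

-- A's even-degree clipping, written arithmetically: the if-branch equals d - d % 2.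
theorem pvD1Eq (d : Int) :
    (if PySem.Int.mod d 2 ≠ 0 then d - 1 else d) = d - PySem.Int.mod d 2 := by
  rcases PySem.Int.mod_two_eq d with h | h <;> rw [h] <;> norm_num

-- the per-step update each vertex receives, indexed form (used to relate both sides)
def pvG (C : Int) (st : Int) (i : Int) (s : List Int) : List Int :=
  PySem.Set.add (PySem.Set.add s (PySem.Int.mod (i - st) C)) (PySem.Int.mod (i + st) C)

-- B's zip sweep over the two rotated sequences is the indexed per-vertex update.
-- one zip sweep with a rotated vertex sequence is the indexed per-vertex update.
theorem pvSweep (C a : Int) (ts : List (List Int)) (f : List Int → Int → List Int)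
    (h0 : 0 ≤ a) (h1 : a < C) (hlen : (ts.length : Int) = C) :
    (ts.zip (PySem.List.pyRange a C ++ PySem.List.pyRange 0 a)).map
        (fun p => f p.1 p.2)
      = (PySem.List.enumerate ts).map
          (fun p => f p.2 (PySem.Int.mod (p.1 + a) C)) := by
  have hC : 0 < C := lt_of_le_of_lt h0 h1
  have hat : (a.toNat : Int) = a := Int.toNat_of_nonneg h0
  have hca : ((C - a).toNat : Int) = C - a := Int.toNat_of_nonneg (by omega)
  apply List.ext_getElem
  · simp only [List.length_map, List.length_zip, List.length_append,
      PySem.List.length_pyRange_one, PySem.List.length_enumerate]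
    omega
  · intro k hk hk'
    have hkts : k < ts.length := by
      simpa [PySem.List.length_enumerate] using hk'
    have hkC : (k : Int) < C := by omega
    simp only [List.getElem_map, List.getElem_zip, PySem.List.getElem_enumerate, zero_add]
    have hmod := PySem.Int.mod_eq_emod_of_pos (a := (k : Int) + a) (b := C) hC
    rcases lt_or_ge k (PySem.List.pyRange a C).length with hlt | hge
    · rw [List.getElem_append_left hlt, PySem.List.getElem_pyRange_one]
      have hks : k < (C - a).toNat := by
        simpa [PySem.List.length_pyRange_one] using hlt
      have e1 : ((k : Int) + a) % C = (k : Int) + a :=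
        Int.emod_eq_of_lt (by omega) (by omega)
      have e2 : a + (k : Int) = PySem.Int.mod ((k : Int) + a) C := by
        rw [hmod, e1]; ring
      rw [e2]
    · have hks : (C - a).toNat ≤ k := by
        simpa [PySem.List.length_pyRange_one] using hge
      have h2 : ((k : Int) + a - C) + C = (k : Int) + a := by ring
      have e1 : ((k : Int) + a) % C = (k : Int) + a - C := by
        conv_lhs => rw [← h2, Int.add_emod_right]
        exact Int.emod_eq_of_lt (by omega) (by omega)
      rw [List.getElem_append_right hge, PySem.List.getElem_pyRange_one]
      have e2 : (0 : Int) + ((k - (PySem.List.pyRange a C).length : Nat) : Int)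
          = PySem.Int.mod ((k : Int) + a) C := by
        rw [hmod, e1]
        simp only [PySem.List.length_pyRange_one]
        omega
      rw [e2]

-- enumerate of a layer built by mapping over an enumerated table keeps the same indices.
theorem pvEnumMapEnum {α β : Type} (ts : List α) (s : Int) (f : Int × α → β) :
    PySem.List.enumerate ((PySem.List.enumerate ts s).map f) s
      = (PySem.List.enumerate ts s).map (fun p => (p.1, f p)) := by
  induction ts generalizing s with
  | nil => rfl
  | cons x xs ih => simp [PySem.List.enumerate_cons, ih]

-- B's two zip sweeps over the rotated sequences are the indexed per-vertex update.
theorem pvLayerEq (C st : Int) (ts : List (List Int)) (h0 : 0 < st) (h1 : st < C)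
    (hlen : (ts.length : Int) = C) :
    pvLayerB C ts st
      = (PySem.List.enumerate ts).map (fun p => pvG C st p.1 p.2) := by
  have hC : 0 < C := lt_trans h0 h1
  have hmm : ∀ x : Int, PySem.Int.mod (x + (C - st)) C = PySem.Int.mod (x - st) C := by
    intro x
    rw [PySem.Int.mod_eq_emod_of_pos (b := C) hC, PySem.Int.mod_eq_emod_of_pos (b := C) hC,
      show x + (C - st) = (x - st) + C by ring, Int.add_emod_right]
  simp only [pvLayerB]
  rw [pvSweep C (C - st) ts PySem.Set.add (by omega) (by omega) hlen]
  rw [pvSweep C st _ PySem.Set.add (le_of_lt h0) h1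
    (by simp [PySem.List.length_enumerate, hlen])]
  rw [pvEnumMapEnum, List.map_map]
  exact List.map_congr_left (fun p _ => by simp only [Function.comp, pvG, hmm])

-- loop interchange: folding layer passes over the whole table equals, per vertex,
-- folding the steps over that vertex's own state.
theorem pvInterchange {β : Type} (steps : List Int) (ts : List (List β))
    (g : Int → Int → List β → List β) :
    steps.foldl
        (fun t st => (PySem.List.enumerate t).map (fun p => g st p.1 p.2)) ts
      = (PySem.List.enumerate ts).map
          (fun p => steps.foldl (fun s st => g st p.1 s) p.2) := by
  induction steps generalizing ts with
  | nil => simp [PySem.List.map_snd_enumerate]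
  | cons st rest ih =>
      simp only [List.foldl_cons, ih, pvEnumMapEnum, List.map_map]
      rfl

-- over in-range steps, B's zip layers fold exactly like the indexed layers.
theorem pvLayersEq (C : Int) (steps : List Int)
    (hs : ∀ st ∈ steps, 0 < st ∧ st < C) :
    ∀ ts : List (List Int), (ts.length : Int) = C →
      steps.foldl (pvLayerB C) ts
        = steps.foldl
            (fun t st => (PySem.List.enumerate t).map (fun p => pvG C st p.1 p.2)) ts := by
  induction steps with
  | nil => intro ts _; rfl
  | cons st rest ih =>
      intro ts hlen
      obtain ⟨h0, h1⟩ := hs st (List.mem_cons_self ..)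
      simp only [List.foldl_cons, pvLayerEq C st ts h0 h1 hlen]
      exact ih (fun x hx => hs x (List.mem_cons_of_mem _ hx)) _
        (by simp [PySem.List.length_enumerate, hlen])

-- the initial table of empty sets reads back the empty set at every index.
theorem pvGetDConst {α β : Type} (xs : List α) (j : Int) (c : List β) :
    PySem.List.pyGetD (xs.map (fun _ => c)) j c = c := by
  simp only [PySem.List.pyGetD, PySem.List.pyGet?, PySem.List.pyIdx?]
  split_ifs <;> simp

-- ===== VERDICT (by name: the statement is the Claim_ definition above) =====
theorem wiring_neighbors_circulant_spec : Claim_equal_wiring_neighbors_circulant := by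
  intro C d _
  unfold Spec_wiring_neighbors_circulant wiring_neighbors_circulant wiring_neighbors_circulant_alt
  by_cases hg : C ≤ 2 ∨ d ≤ 0
  · simp [hg]
  · simp only [if_neg hg]
    rw [pvD1Eq d]
    set m : Int := min (d - PySem.Int.mod d 2) (C - 1) with hm
    have hq := PySem.Int.floordiv_mul_add_mod m 2
    have h0 := PySem.Int.mod_nonneg m (by omega : (0:Int) < 2)
    have h1 := PySem.Int.mod_lt m (by omega : (0:Int) < 2)
    by_cases hz : m ≤ 0
    · rw [if_pos hz]
      have hr : PySem.List.pyRange 1 (PySem.Int.floordiv m 2 + 1) = [] := by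
        apply List.eq_nil_of_length_eq_zero
        rw [PySem.List.length_pyRange_one]
        rw [PySem.Int.floordiv_eq_ediv_of_pos (by omega)]
        omega
      rw [hr]; rfl
    · rw [if_neg hz]
      rw [PySem.List.foldl_append_singleton_eq_map, List.nil_append]
      rw [pvLayersEq C _ ?_ _ ?_]
      · rw [pvInterchange]
        rw [PySem.List.enumerate_eq_map_pyRange _ ([] : List Int)]
        have hlen : PySem.List.len ((PySem.List.pyRange 0 C).map (fun _ => ([] : List Int))) = C := by
          simp [PySem.List.len, PySem.List.length_pyRange_one]
          omega
        rw [hlen, List.map_map]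
        refine List.map_congr_left (fun j _ => ?_)
        simp only [Function.comp, pvGetDConst, pvG]
        rfl
      · intro st hst
        rw [PySem.List.mem_pyRange_one] at hst
        constructor <;> omega
      · simp [PySem.List.length_pyRange_one]
        omega
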